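-- pv_equiv track=rewrite | github.com/SimonFans/LeetCode | OA/MS/String Without 3 Identical Consecutive Letters.py | minDeletes3Consecutive
-- ===== SOURCE A (Python) =====
-- def minDeletes3Consecutive(word):
--     if len(word) < 3:
--         return word
--     prev = word[0]
--     count = 1
--     ret = word
--     i = 1
--     while i < len(ret):
--         if ret[i] == prev:
--             count +=1
--         else:
--             prev = ret[i]
--             count = 1
--         if count > 2:
--             ret = ret[:i] + ret[i+1:]
--             count -= 1
--         else:
--             i+=1
--     return ret
-- ===== SOURCE B (Python) =====
-- def minDeletes3Consecutive(word):
--     out = []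
--     prev = None
--     run = 0
--     for ch in word:
--         if ch == prev:
--             run += 1
--         else:
--             prev, run = ch, 1
--         if run <= 2:
--             out.append(ch)
--     return ''.join(out)
-- ===== Notes on version B (the rewrite author's own statement) =====
-- stated objective: faster
-- what changed: Replaced A's while-loop that deletes third-in-a-run characters by repeated string slicing (O(n) per deletion) with a single left-to-right pass keeping a run-length counter and appending kept characters to a list joined at the end.
import Mathlib
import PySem

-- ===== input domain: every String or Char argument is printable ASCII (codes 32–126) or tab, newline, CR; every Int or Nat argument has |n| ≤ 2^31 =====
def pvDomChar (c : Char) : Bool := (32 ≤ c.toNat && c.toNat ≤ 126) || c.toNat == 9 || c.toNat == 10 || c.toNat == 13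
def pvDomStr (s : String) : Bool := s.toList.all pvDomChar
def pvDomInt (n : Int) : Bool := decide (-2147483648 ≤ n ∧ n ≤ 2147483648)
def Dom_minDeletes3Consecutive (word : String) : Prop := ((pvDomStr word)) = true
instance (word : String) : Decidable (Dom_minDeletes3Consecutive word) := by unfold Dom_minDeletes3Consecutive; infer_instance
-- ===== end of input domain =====

-- B replaces A's quadratic delete-by-slicing while-loop with a single left-to-right
-- pass keeping a run-length counter (objective: faster, asymptotic).

-- ===== PORT A =====
-- A's while-loop; fuel is a pure totality guard (each iteration decreases ret.length - i,
-- which starts at ret.length - 1, so fuel = ret.length is never exhausted).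
-- i is always ≥ 1 in A, and ret[:i] + ret[i+1:] = take i ++ drop (i+1) (exact for 0 ≤ i).
def pvLoopA (fuel : Nat) (ret : List Char) (i : Nat) (prev : Char) (count : Nat) : List Char :=
  match fuel with
  | 0 => ret
  | fuel + 1 =>
    if h : i < ret.length then
      let c := ret[i]
      let pc : Char × Nat := if c = prev then (prev, count + 1) else (c, 1)
      if pc.2 > 2 then
        pvLoopA fuel (ret.take i ++ ret.drop (i + 1)) i pc.1 (pc.2 - 1)
      else
        pvLoopA fuel ret (i + 1) pc.1 pc.2
    else ret

def minDeletes3Consecutive (word : String) : String :=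
  let l := word.toList
  if l.length < 3 then word
  else
    match l with
    | [] => word  -- unreachable: l.length ≥ 3
    | c :: rest => String.ofList (pvLoopA l.length (c :: rest) 1 c 1)

-- ===== PORT B =====
-- one fold step of B: update (prev, run), keep the char iff the run stays ≤ 2
def pvStepB (st : List Char × Option Char × Nat) (ch : Char) : List Char × Option Char × Nat :=
  let pr : Option Char × Nat := if some ch = st.2.1 then (st.2.1, st.2.2 + 1) else (some ch, 1)
  if pr.2 ≤ 2 then (st.1 ++ [ch], pr.1, pr.2) else (st.1, pr.1, pr.2)

def minDeletes3Consecutive_alt (word : String) : String :=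
  String.ofList (word.toList.foldl pvStepB ([], none, 0)).1

-- ===== PRECONDITION & SPEC =====
def Spec_minDeletes3Consecutive (word : String) (out : String) : Prop := out = minDeletes3Consecutive_alt word
instance (word : String) (out : String) : Decidable (Spec_minDeletes3Consecutive word out) := by unfold Spec_minDeletes3Consecutive; infer_instance

-- ===== CLAIM (what is proved, stated in full; the proofs are below) =====
def Claim_equal_minDeletes3Consecutive : Prop := ∀ (word : String), Dom_minDeletes3Consecutive word → Spec_minDeletes3Consecutive word (minDeletes3Consecutive word)

-- ===== LEMMAS AND PROOFS =====

-- A's loop at position pre.length over pre ++ rest equals B's fold over rest from state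
-- (pre, some prev, run), provided A's capped counter satisfies count = min run 2 and the
-- fuel covers the remaining characters.
theorem pvLoopA_eq_fold (rest : List Char) : ∀ (fuel : Nat) (pre : List Char) (prev : Char) (run count : Nat),
    rest.length ≤ fuel → 1 ≤ run → count = min run 2 →
    pvLoopA fuel (pre ++ rest) pre.length prev count = (rest.foldl pvStepB (pre, some prev, run)).1 := by
  induction rest with
  | nil =>
    intro fuel pre prev run count _ _ _
    cases fuel with
    | zero => simp [pvLoopA]
    | succ f => rw [pvLoopA]; simp
  | cons c rest ih =>
    intro fuel pre prev run count hfuel hrun hcount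
    match fuel, hfuel with
    | f + 1, hfuel =>
    have hf : rest.length ≤ f := by simpa using hfuel
    rw [pvLoopA]
    have hlt : pre.length < (pre ++ c :: rest).length := by simp
    have hget : (pre ++ c :: rest)[pre.length]'hlt = c := by simp
    rw [dif_pos hlt]
    simp only [hget]
    have hsplit : pre ++ c :: rest = (pre ++ [c]) ++ rest := by simp
    by_cases hc : c = prev
    · rw [if_pos hc]
      by_cases h2 : run ≥ 2
      · -- run ≥ 2 hence count = 2, count+1 > 2 : A deletes the char, B skips it
        have hc2 : count = 2 := by omega
        have htk : (pre ++ c :: rest).take pre.length = pre := by simp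
        have hdr : (pre ++ c :: rest).drop (pre.length + 1) = rest := by
          rw [hsplit, show pre.length + 1 = (pre ++ [c]).length by simp, List.drop_left]
        simp only [hc2]
        norm_num [htk, hdr]
        rw [ih f pre prev (run + 1) 2 hf (by omega) (by omega)]
        have hB : pvStepB (pre, some prev, run) c = (pre, some prev, run + 1) := by
          simp [pvStepB, hc, show ¬ (run + 1 ≤ 2) by omega]
        rw [hB]
      · -- run = 1, count = 1 : both keep c, counters become 2
        have hc1 : count = 1 := by omega
        have hrun1 : run = 1 := by omega
        simp only [hc1]
        norm_num
        rw [hsplit, show pre.length + 1 = (pre ++ [c]).length by simp,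
          ih f (pre ++ [c]) prev 2 2 hf (by omega) (by omega)]
        have hB : pvStepB (pre, some prev, run) c = (pre ++ [c], some prev, 2) := by
          simp [pvStepB, hc, hrun1]
        rw [hB]
    · rw [if_neg hc]
      norm_num
      rw [hsplit, show pre.length + 1 = (pre ++ [c]).length by simp,
        ih f (pre ++ [c]) c 1 1 hf (by omega) (by omega)]
      have hB : pvStepB (pre, some prev, run) c = (pre ++ [c], some c, 1) := by
        simp [pvStepB, hc]
      rw [hB]

-- ===== VERDICT (by name: the statement is the Claim_ definition above) =====
theorem minDeletes3Consecutive_spec : Claim_equal_minDeletes3Consecutive := by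
  intro word _
  unfold Spec_minDeletes3Consecutive minDeletes3Consecutive minDeletes3Consecutive_alt
  by_cases h : word.toList.length < 3
  · rw [if_pos h]
    -- ≤ 2 characters: B keeps everything, so it returns the word unchanged
    have hkeep : (word.toList.foldl pvStepB ([], none, 0)).1 = word.toList := by
      rcases hw : word.toList with _ | ⟨a, _ | ⟨b, _ | ⟨x, t⟩⟩⟩
      · rfl
      · simp [pvStepB]
      · by_cases hab : b = a <;> simp [pvStepB, hab]
      · exfalso; rw [hw] at h; simp at h; omega
    rw [hkeep, String.ofList_toList]
  · rw [if_neg h]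
    obtain ⟨c, rest, hw⟩ : ∃ c rest, word.toList = c :: rest := by
      cases hcl : word.toList with
      | nil => rw [hcl] at h; simp at h
      | cons c rest => exact ⟨c, rest, rfl⟩
    have h1 : pvLoopA (c :: rest).length (c :: rest) 1 c 1
        = (rest.foldl pvStepB ([c], some c, 1)).1 := by
      simpa using pvLoopA_eq_fold rest (c :: rest).length [c] c 1 1 (by simp) (by omega) (by omega)
    have hB0 : pvStepB ([], none, 0) c = ([c], some c, 1) := by simp [pvStepB]
    simp only [hw, List.foldl_cons, hB0, h1]
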